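-- pv_equiv track=rewrite | github.com/svasek/homeassistant-vistapool-modbus | custom_components/vistapool/helpers.py | modbus_regs_to_ascii
-- ===== SOURCE A (Python) =====
-- def modbus_regs_to_ascii(regs) -> str:
--     """Convert list of uint16 Modbus registers to ASCII string (ASCIIZ, max 10 chars)."""
--     chars = []
--     for reg in regs:
--         # High byte (1st char)
--         high = (reg >> 8) & 0xFF
--         # Low byte (2nd char)
--         low = reg & 0xFF
--         if high != 0:
--             chars.append(chr(high))
--         else:  # pragma: no cover
--             break
--         if low != 0:
--             chars.append(chr(low))
--         else:
--             break
--     return "".join(chars)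
-- ===== SOURCE B (Python) =====
-- def modbus_regs_to_ascii(regs) -> str:
--     """Convert list of uint16 Modbus registers to ASCII string (ASCIIZ, max 10 chars)."""
--     data = bytearray()
--     for reg in regs:
--         data.append((reg >> 8) & 0xFF)
--         data.append(reg & 0xFF)
--     i = data.find(0)
--     if i != -1:
--         data = data[:i]
--     return data.decode("latin-1")
-- ===== Notes on version B (the rewrite author's own statement) =====
-- stated objective: idiomatic
-- what changed: Replaces the fused extract-and-break loop by three phases: flatten all registers into a bytearray, locate the first zero byte with find(0), slice, and decode latin-1.
import Mathlib
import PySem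

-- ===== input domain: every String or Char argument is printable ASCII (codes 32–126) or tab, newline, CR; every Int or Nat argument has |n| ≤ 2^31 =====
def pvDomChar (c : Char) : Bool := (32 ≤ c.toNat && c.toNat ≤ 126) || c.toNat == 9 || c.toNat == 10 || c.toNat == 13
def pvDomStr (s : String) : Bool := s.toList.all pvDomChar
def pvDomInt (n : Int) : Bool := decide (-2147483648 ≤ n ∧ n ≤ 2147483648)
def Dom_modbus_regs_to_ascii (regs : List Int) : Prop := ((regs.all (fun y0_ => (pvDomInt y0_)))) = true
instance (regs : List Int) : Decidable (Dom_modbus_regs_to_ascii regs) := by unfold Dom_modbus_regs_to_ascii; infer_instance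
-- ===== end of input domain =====

-- B replaces the fused extract-and-break loop by three phases (flatten to bytes, find first zero, slice+decode); idiomatic, same cost.

-- ===== PORT A =====
-- chr(b) for a byte value 0..255 (exact there)
def pvChr (b : Int) : Char := Char.ofNat b.toNat

-- the loop: accumulates chars, breaks at the first zero byte
def pvGoA : List Int → List Char → List Char
  | [], chars => chars
  | reg :: rest, chars =>
    let high := PySem.Int.band (reg >>> 8) 255
    let low := PySem.Int.band reg 255
    if high ≠ 0 then
      if low ≠ 0 then pvGoA rest (chars ++ [pvChr high, pvChr low])
      else chars ++ [pvChr high]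
    else chars

def modbus_regs_to_ascii (regs : List Int) : String :=
  String.mk (pvGoA regs [])

-- ===== PORT B =====
-- phase 1: flatten registers into bytes
def pvBytes (regs : List Int) : List Int :=
  regs.foldl (fun (data : List Int) (reg : Int) => data ++ [PySem.Int.band (reg >>> 8) 255, PySem.Int.band reg 255]) []

def modbus_regs_to_ascii_alt (regs : List Int) : String :=
  let data := pvBytes regs
  -- data.find(0): first index of 0, none if absent; slice keeps all when absent
  let data := match data.idxOf? (0 : Int) with
    | some i => data.take i
    | none => data
  String.mk (data.map pvChr)   -- decode("latin-1") = chr per byte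

-- ===== PRECONDITION & SPEC =====
def Spec_modbus_regs_to_ascii (regs : List Int) (out : String) : Prop := out = modbus_regs_to_ascii_alt regs
instance (regs : List Int) (out : String) : Decidable (Spec_modbus_regs_to_ascii regs out) := by unfold Spec_modbus_regs_to_ascii; infer_instance

-- ===== CLAIM (what is proved, stated in full; the proofs are below) =====
def Claim_equal_modbus_regs_to_ascii : Prop := ∀ (regs : List Int), Dom_modbus_regs_to_ascii regs → Spec_modbus_regs_to_ascii regs (modbus_regs_to_ascii regs)

-- ===== LEMMAS AND PROOFS =====

-- slicing at the first zero = takeWhile (≠ 0)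
theorem take_idxOf_eq_takeWhile (l : List Int) :
    (match l.idxOf? (0 : Int) with
      | some i => l.take i
      | none => l) = l.takeWhile (fun b => !(b == 0)) := by
  induction l with
  | nil => rfl
  | cons a t ih =>
    rw [List.takeWhile_cons]
    by_cases h : a = 0
    · subst h; simp [List.idxOf?_cons]
    · simp only [List.idxOf?_cons, beq_iff_eq, h, if_false]
      cases ht : t.idxOf? (0 : Int) with
      | some i => simp only [ht] at ih; simp [h, List.take_succ_cons, ← ih]
      | none => simp only [ht] at ih; simp [h, ← ih]

theorem pvBytes_cons (reg : Int) (rest : List Int) :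
    pvBytes (reg :: rest) = PySem.Int.band (reg >>> 8) 255 :: PySem.Int.band reg 255 :: pvBytes rest := by
  unfold pvBytes
  rw [PySem.List.foldl_append_eq_flatMap, PySem.List.foldl_append_eq_flatMap]
  simp

-- the loop invariant: A's accumulator followed by the takeWhile of the remaining bytes
theorem pvGoA_eq (regs : List Int) (chars : List Char) :
    pvGoA regs chars = chars ++ ((pvBytes regs).takeWhile (fun b => !(b == 0))).map pvChr := by
  induction regs generalizing chars with
  | nil => simp [pvGoA, pvBytes]
  | cons reg rest ih =>
    rw [pvBytes_cons, List.takeWhile_cons]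
    by_cases hh : PySem.Int.band (reg >>> 8) 255 = 0
    · simp [pvGoA, hh]
    · rw [List.takeWhile_cons]
      by_cases hl : PySem.Int.band reg 255 = 0
      · simp [pvGoA, hh, hl]
      · simp only [pvGoA, hh, hl, beq_iff_eq, if_false, decide_eq_false_iff_not, Bool.not_false,
          if_true, ne_eq, not_false_eq_true, if_pos]
        rw [ih]
        simp [hh, hl]

-- ===== VERDICT (by name: the statement is the Claim_ definition above) =====
theorem modbus_regs_to_ascii_spec : Claim_equal_modbus_regs_to_ascii := by
  intro regs _
  show modbus_regs_to_ascii regs = modbus_regs_to_ascii_alt regs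
  unfold modbus_regs_to_ascii modbus_regs_to_ascii_alt
  dsimp only
  rw [pvGoA_eq, take_idxOf_eq_takeWhile]
  simp
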